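-- pv_equiv track=rewrite | github.com/BartlomiejWierzba04/Project-Euler- | ProjectEuler12.py | number_of_divisors_from_factors
-- ===== SOURCE A (Python) =====
-- def number_of_divisors_from_factors(factors):
--     # Count the exponents of each prime factor
--     exponent_counts = {}
--     for p in factors:
--         exponent_counts[p] = exponent_counts.get(p, 0) + 1
--
--     # Calculate the number of divisors
--     divisors = 1
--     for exp in exponent_counts.values():
--         divisors *= (exp + 1)
--
--     return divisors
-- ===== SOURCE B (Python) =====
-- def number_of_divisors_from_factors(factors):
--     # Sort, then do one run-length scan: multiply by (run length + 1) per run of equal factors.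
--     divisors = 1
--     run = 0
--     prev = None
--     for p in sorted(factors):
--         if run > 0 and prev == p:
--             run += 1
--         else:
--             divisors *= run + 1
--             run = 1
--             prev = p
--     divisors *= run + 1
--     return divisors
-- ===== Notes on version B (the rewrite author's own statement) =====
-- stated objective: alternative
-- what changed: Replaces the dict of per-prime exponent counts with a sort followed by a run-length scan: multiply the accumulator by (run length + 1) for each run of equal consecutive factors.
import Mathlib
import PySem

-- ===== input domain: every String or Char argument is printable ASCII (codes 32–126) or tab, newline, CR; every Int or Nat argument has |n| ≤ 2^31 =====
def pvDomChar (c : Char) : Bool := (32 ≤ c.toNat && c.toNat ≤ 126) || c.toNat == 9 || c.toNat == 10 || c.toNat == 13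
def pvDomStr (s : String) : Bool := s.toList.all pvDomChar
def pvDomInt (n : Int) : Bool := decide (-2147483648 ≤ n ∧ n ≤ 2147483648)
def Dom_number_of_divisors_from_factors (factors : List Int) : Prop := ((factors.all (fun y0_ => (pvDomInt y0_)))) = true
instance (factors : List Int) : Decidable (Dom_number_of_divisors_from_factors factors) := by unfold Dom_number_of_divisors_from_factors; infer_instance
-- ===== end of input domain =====

-- B replaces A's dict of exponent counts with a sort + run-length scan (multiply by run length + 1
-- per run of equal consecutive factors); alternative decomposition, not claimed faster.


-- ===== PORT A =====
-- exponent_counts[p] = exponent_counts.get(p, 0) + 1, then product of (exp + 1) over the values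
def number_of_divisors_from_factors (factors : List Int) : Int :=
  let exponent_counts := factors.foldl (fun d p => d.insert p (d.getD p 0 + 1)) PySem.Dict.empty
  exponent_counts.values.foldl (fun divisors exp => divisors * (exp + 1)) 1

-- ===== PORT B =====
-- one iteration of the scan over sorted(factors); state = (divisors, run, prev)
def pvStep (s : Int × Int × Option Int) (p : Int) : Int × Int × Option Int :=
  if 0 < s.2.1 ∧ s.2.2 = some p then (s.1, s.2.1 + 1, s.2.2)
  else (s.1 * (s.2.1 + 1), 1, some p)

def number_of_divisors_from_factors_alt (factors : List Int) : Int :=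
  let st := (PySem.List.sorted factors (fun x => x) false).foldl pvStep (1, 0, none)
  st.1 * (st.2.1 + 1)

-- ===== PRECONDITION & SPEC =====
def Spec_number_of_divisors_from_factors (factors : List Int) (out : Int) : Prop := out = number_of_divisors_from_factors_alt factors
instance (factors : List Int) (out : Int) : Decidable (Spec_number_of_divisors_from_factors factors out) := by unfold Spec_number_of_divisors_from_factors; infer_instance

-- ===== CLAIM (what is proved, stated in full; the proofs are below) =====
def Claim_equal_number_of_divisors_from_factors : Prop := ∀ (factors : List Int), Dom_number_of_divisors_from_factors factors → Spec_number_of_divisors_from_factors factors (number_of_divisors_from_factors factors)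

-- ===== LEMMAS AND PROOFS =====

-- common form both programs compute: product of (multiplicity + 1) over the distinct factors
def pvProd (xs : List Int) : Int :=
  ((PySem.Set.ofList xs).map (fun k => ((xs.count k : Int) + 1))).prod

lemma pv_foldl_mul_succ (l : List Int) (a : Int) :
    l.foldl (fun acc e => acc * (e + 1)) a = a * (l.map (fun e => e + 1)).prod := by
  induction l generalizing a with
  | nil => simp
  | cons x t ih => simp [List.foldl_cons, ih, mul_assoc]

lemma pv_ofList_filter (p : Int → Bool) (xs : List Int) :
    PySem.Set.ofList (xs.filter p) = (PySem.Set.ofList xs).filter p := by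
  induction xs with
  | nil => rfl
  | cons x t ih =>
    by_cases hx : p x = true
    · rw [List.filter_cons_of_pos hx, PySem.Set.ofList_cons, PySem.Set.ofList_cons,
        List.filter_cons_of_pos hx, ih]
      simp only [PySem.Set.discard, List.filter_filter]
      exact congrArg _ (List.filter_congr (fun a _ => by rw [Bool.and_comm]))
    · rw [List.filter_cons_of_neg hx, PySem.Set.ofList_cons, List.filter_cons_of_neg hx, ih]
      simp only [PySem.Set.discard, List.filter_filter]
      refine List.filter_congr (fun a _ => ?_)
      by_cases hax : a = x
      · subst hax; simp [hx]
      · simp [hax]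

lemma pv_A_eq_prod (xs : List Int) : number_of_divisors_from_factors xs = pvProd xs := by
  unfold number_of_divisors_from_factors pvProd
  rw [PySem.Dict.foldl_insert_getD_add_one_eq_counter]
  show List.foldl (fun divisors exp => divisors * (exp + 1)) 1 (PySem.Dict.counter xs).values = _
  rw [PySem.Dict.values_eq_map_keys _ (PySem.Dict.nodup_keys_counter xs) 0,
    PySem.Dict.keys_counter, pv_foldl_mul_succ, List.map_map, one_mul]
  simp [PySem.Dict.getD_counter, Function.comp_def]

lemma pv_prod_cons (p : Int) (t : List Int) :
    pvProd (p :: t) = (((p :: t).count p : Int) + 1) * pvProd (t.filter (fun q => !(q == p))) := by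
  unfold pvProd
  rw [PySem.Set.ofList_cons]
  simp only [PySem.Set.discard, ← pv_ofList_filter, List.map_cons, List.prod_cons]
  congr 1
  refine congrArg _ (List.map_congr_left (fun k hk => ?_))
  have hkmem : k ∈ t.filter (fun q => !(q == p)) := (PySem.Set.mem_ofList _ _).mp hk
  have hkp : ¬ (k == p) = true := by
    have := List.of_mem_filter hkmem
    simpa using this
  have hne : k ≠ p := fun h => hkp (by simp [h])
  rw [List.count_filter (by simpa using hne)]
  simp [Ne.symm hne]

lemma pv_prod_perm {xs ys : List Int} (h : xs.Perm ys) : pvProd xs = pvProd ys := by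
  unfold pvProd
  have hf : (fun k => ((xs.count k : Int) + 1)) = (fun k => ((ys.count k : Int) + 1)) :=
    funext fun k => by rw [h.count_eq]
  have hperm : (PySem.Set.ofList xs).Perm (PySem.Set.ofList ys) :=
    (List.perm_ext_iff_of_nodup (PySem.Set.nodup_ofList xs) (PySem.Set.nodup_ofList ys)).mpr
      (fun a => by simp only [PySem.Set.mem_ofList]; exact h.mem_iff)
  rw [hf]
  exact (hperm.map _).prod_eq

-- the scan, started inside a run of p with `run` occurrences already seen
lemma pv_scan_run (ys : List Int) : ys.Pairwise (· ≤ ·) → ∀ (p : Int), (∀ x ∈ ys, p ≤ x) →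
    ∀ (d run : Int), 0 < run →
    (ys.foldl pvStep (d, run, some p)).1 * ((ys.foldl pvStep (d, run, some p)).2.1 + 1)
      = d * (run + (ys.count p : Int) + 1) * pvProd (ys.filter (fun q => !(q == p))) := by
  induction ys with
  | nil =>
    intro _ p _ d run _
    simp only [List.foldl_nil, List.count_nil, List.filter_nil]
    simp [pvProd, PySem.Set.ofList]
  | cons q t ih =>
    intro hs p hlb d run hrun
    obtain ⟨hqle, ht⟩ := List.pairwise_cons.mp hs
    by_cases hqp : q = p
    · subst hqp
      rw [List.foldl_cons]
      have hstep : pvStep (d, run, some q) q = (d, run + 1, some q) := by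
        simp [pvStep, hrun]
      rw [hstep, ih ht q (fun x hx => hqle x hx) d (run + 1) (by omega)]
      simp only [List.count_cons_self, List.filter_cons, beq_self_eq_true, Bool.not_true,
        Bool.false_eq_true, if_neg, not_false_iff]
      push_cast
      ring
    · have hplt : p < q := lt_of_le_of_ne (hlb q (List.mem_cons_self)) (Ne.symm hqp)
      rw [List.foldl_cons]
      have hcond : ¬(0 < ((d, run, some p) : Int × Int × Option Int).2.1 ∧
          ((d, run, some p) : Int × Int × Option Int).2.2 = some q) := by
        rintro ⟨_, h⟩
        exact hqp (Option.some.inj h).symm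
      have hstep : pvStep (d, run, some p) q = (d * (run + 1), 1, some q) := by
        unfold pvStep
        rw [if_neg hcond]
      rw [hstep, ih ht q (fun x hx => hqle x hx) (d * (run + 1)) 1 (by omega)]
      have hnotmem : p ∉ q :: t := by
        intro hmem
        rcases List.mem_cons.mp hmem with h | h
        · exact hqp h.symm
        · exact absurd (lt_of_lt_of_le hplt (hqle p h)) (lt_irrefl p)
      have hfe : List.filter (fun q' => !(q' == p)) (q :: t) = q :: t :=
        List.filter_eq_self.mpr (fun a ha => by
          simpa using fun h : a = p => hnotmem (h ▸ ha))
      rw [List.count_eq_zero.mpr hnotmem, hfe, pv_prod_cons q t, List.count_cons_self]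
      push_cast
      ring

lemma pv_B_eq_prod (xs : List Int) : number_of_divisors_from_factors_alt xs = pvProd xs := by
  unfold number_of_divisors_from_factors_alt
  have hperm : (PySem.List.sorted xs (fun x => x) false).Perm xs :=
    PySem.List.sorted_perm xs (fun x => x) false
  have hs : (PySem.List.sorted xs (fun x => x) false).Pairwise (· ≤ ·) :=
    PySem.List.sorted_pairwise xs (fun x => x)
  rw [← pv_prod_perm hperm]
  cases hys : PySem.List.sorted xs (fun x => x) false with
  | nil => simp [pvProd, PySem.Set.ofList]
  | cons q t =>
    rw [hys] at hs
    obtain ⟨hqle, ht⟩ := List.pairwise_cons.mp hs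
    show (((q :: t).foldl pvStep (1, 0, none)).1 * (((q :: t).foldl pvStep (1, 0, none)).2.1 + 1)) = _
    rw [List.foldl_cons]
    have hstep : pvStep ((1 : Int), (0 : Int), (none : Option Int)) q = (1, 1, some q) := by
      simp [pvStep]
    rw [hstep, pv_scan_run t ht q (fun x hx => hqle x hx) 1 1 (by omega), pv_prod_cons q t,
      List.count_cons_self]
    push_cast
    ring

-- ===== VERDICT (by name: the statement is the Claim_ definition above) =====
theorem number_of_divisors_from_factors_spec : Claim_equal_number_of_divisors_from_factors := by
  intro factors _
  unfold Spec_number_of_divisors_from_factors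
  rw [pv_A_eq_prod, pv_B_eq_prod]
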